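-- pv_equiv track=rewrite | github.com/anotherpanacea-eng/burning-empires-lifepath-navigator | character_validator.py | get_stat_pools
-- ===== SOURCE A (Python) =====
-- from typing import List, Dict, Tuple, Optional, Set, Any
--
-- AGE_BRACKETS = [
--     (10,  5, 10),   # 01-10
--     (14,  6, 13),   # 11-14
--     (16,  6, 16),   # 15-16
--     (25,  7, 16),   # 17-25
--     (29,  7, 15),   # 26-29
--     (35,  7, 14),   # 30-35
--     (40,  7, 13),   # 36-40
--     (55,  7, 12),   # 41-55
--     (65,  7, 11),   # 56-65
--     (79,  7, 10),   # 66-79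
--     (100, 6,  9),   # 80-100
-- ]
--
-- def get_stat_pools(age: int) -> Tuple[int, int, str]:
--     """Look up base Mental and Physical pools for an age bracket.
--
--     Returns: (mental, physical, bracket_label)
--     """
--     prev_max = 0
--     for max_age, mental, physical in AGE_BRACKETS:
--         if age <= max_age:
--             low = prev_max + 1
--             label = f"{low:02d}-{max_age}"
--             return mental, physical, label
--         prev_max = max_age
--     return 6, 9, "80-100"
-- ===== SOURCE B (Python) =====
-- from typing import Tuple
--
-- AGE_BRACKETS = [
--     (10,  5, 10),
--     (14,  6, 13),
--     (16,  6, 16),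
--     (25,  7, 16),
--     (29,  7, 15),
--     (35,  7, 14),
--     (40,  7, 13),
--     (55,  7, 12),
--     (65,  7, 11),
--     (79,  7, 10),
--     (100, 6,  9),
-- ]
--
-- _MAX_AGES = [b[0] for b in AGE_BRACKETS]
--
--
-- def _bisect_left(a, x):
--     lo, hi = 0, len(a)
--     while lo < hi:
--         mid = (lo + hi) // 2
--         if a[mid] < x:
--             lo = mid + 1
--         else:
--             hi = mid
--     return lo
--
--
-- def get_stat_pools(age: int) -> Tuple[int, int, str]:
--     """Look up base Mental and Physical pools for an age bracket."""
--     idx = _bisect_left(_MAX_AGES, age)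
--     if idx == len(_MAX_AGES):
--         return 6, 9, "80-100"
--     max_age, mental, physical = AGE_BRACKETS[idx]
--     low = _MAX_AGES[idx - 1] + 1 if idx > 0 else 1
--     return mental, physical, f"{low:02d}-{max_age}"
-- ===== Notes on version B (the rewrite author's own statement) =====
-- stated objective: idiomatic
-- what changed: Replaces the linear scan with prev_max bookkeeping by a hand-written bisect_left binary search over the precomputed max-age column, deriving the bracket's low bound from the previous entry by index.
import Mathlib
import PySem

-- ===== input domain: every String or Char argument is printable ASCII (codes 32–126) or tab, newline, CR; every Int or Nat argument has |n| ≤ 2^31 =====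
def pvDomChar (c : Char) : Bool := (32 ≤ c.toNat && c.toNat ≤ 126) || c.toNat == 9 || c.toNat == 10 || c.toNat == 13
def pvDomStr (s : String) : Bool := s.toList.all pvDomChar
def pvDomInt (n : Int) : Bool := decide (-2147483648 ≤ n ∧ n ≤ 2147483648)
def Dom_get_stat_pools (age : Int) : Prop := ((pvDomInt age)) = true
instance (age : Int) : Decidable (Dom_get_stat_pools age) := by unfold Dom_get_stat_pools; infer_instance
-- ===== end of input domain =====

set_option maxRecDepth 10000
set_option maxHeartbeats 2000000


-- B replaces A's linear scan (with prev_max bookkeeping) by a bisect_left binary search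
-- over the precomputed max-age column; idiomatic, same exact results.

-- shared module-level constant AGE_BRACKETS (both Source A and Source B define this same table)
def pyAgeBrackets : List (Int × Int × Int) :=
  [(10, 5, 10), (14, 6, 13), (16, 6, 16), (25, 7, 16), (29, 7, 15), (35, 7, 14),
   (40, 7, 13), (55, 7, 12), (65, 7, 11), (79, 7, 10), (100, 6, 9)]

-- f"{n:02d}": zero-pad the decimal form to width 2 (exact for n ≥ 0, the only values reached)
def pvPad2 (n : Int) : String :=
  let s := PySem.Int.toStr n
  if PySem.Str.len s < 2 then "0" ++ s else s

-- ===== PORT A =====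
-- the 'for max_age, mental, physical in AGE_BRACKETS' loop with the prev_max accumulator
def getStatPoolsLoop (age : Int) (prevMax : Int) : List (Int × Int × Int) → Int × Int × String
  | [] => (6, 9, "80-100")
  | (maxAge, mental, physical) :: rest =>
    if age ≤ maxAge then
      let low := prevMax + 1
      (mental, physical, pvPad2 low ++ "-" ++ PySem.Int.toStr maxAge)
    else getStatPoolsLoop age maxAge rest

def get_stat_pools (age : Int) : Int × Int × String :=
  getStatPoolsLoop age 0 pyAgeBrackets

-- ===== PORT B =====
-- Source B's hand-written bisect_left while-loop (indices are Nats; Python's nonnegative ints here)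
def pvBisectLoop (a : List Int) (x : Int) (lo hi : Nat) : Nat :=
  if h : lo < hi then
    let mid := (lo + hi) / 2
    if PySem.List.pyGetD a (mid : Int) 0 < x then pvBisectLoop a x (mid + 1) hi
    else pvBisectLoop a x lo mid
  else lo
termination_by hi - lo
decreasing_by all_goals omega

def pvBisectLeft (a : List Int) (x : Int) : Nat := pvBisectLoop a x 0 a.length

def get_stat_pools_alt (age : Int) : Int × Int × String :=
  let maxAges := pyAgeBrackets.map (·.1)
  let idx := pvBisectLeft maxAges age
  if idx = maxAges.length then (6, 9, "80-100")
  else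
    let b := PySem.List.pyGetD pyAgeBrackets (idx : Int) (0, 0, 0)
    let low := if 0 < idx then PySem.List.pyGetD maxAges ((idx : Int) - 1) 0 + 1 else 1
    (b.2.1, b.2.2, pvPad2 low ++ "-" ++ PySem.Int.toStr b.1)

-- ===== PRECONDITION & SPEC =====
def Spec_get_stat_pools (age : Int) (out : Int × Int × String) : Prop := out = get_stat_pools_alt age
instance (age : Int) (out : Int × Int × String) : Decidable (Spec_get_stat_pools age out) := by unfold Spec_get_stat_pools; infer_instance

-- ===== CLAIM (what is proved, stated in full; the proofs are below) =====
def Claim_equal_get_stat_pools : Prop := ∀ (age : Int), Dom_get_stat_pools age → Spec_get_stat_pools age (get_stat_pools age)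

-- ===== LEMMAS AND PROOFS =====
theorem pv_main : ∀ (age : Int), Spec_get_stat_pools age (get_stat_pools age) := by
  intro age
  unfold Spec_get_stat_pools get_stat_pools get_stat_pools_alt pvBisectLeft
  simp only [pyAgeBrackets, getStatPoolsLoop, List.map, List.length]
  simp [pvBisectLoop, PySem.List.pyGetD]
  split_ifs <;> first | rfl | omega | exact False.elim ‹False›

-- ===== VERDICT (by name: the statement is the Claim_ definition above) =====
theorem get_stat_pools_spec : Claim_equal_get_stat_pools := by
  intro age _; exact pv_main age
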